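-- pv_equiv track=rewrite | github.com/vaithak/Advent-of-Code-2021 | Day-25/code.py | process_east_step
-- ===== SOURCE A (Python) =====
-- def process_east_step(matrix):
--     cnt = 0
--     for row in matrix:
--         first_elem = row[0]
--         j, n = 0, len(row)
--         while j < n:
--             if row[j] == '>':
--                 if j == n-1:
--                     if first_elem == '.':
--                         row[j] = '.'
--                         row[0] = '>'
--                         cnt += 1
--                 elif row[j+1] == '.':
--                     row[j] = '.'
--                     row[j+1] = '>'
--                     j += 1
--                     cnt += 1
--             j += 1
--     return cnt
-- ===== SOURCE B (Python) =====
-- # Two-pass per row: first identify all movable east-facing cucumbers from the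
-- # original row, then apply the moves (same in-place row mutation as A).
-- def process_east_step(matrix):
--     cnt = 0
--     for row in matrix:
--         n = len(row)
--         moves = [j for j in range(n) if row[j] == '>' and row[(j + 1) % n] == '.']
--         for j in moves:
--             row[j] = '.'
--             row[(j + 1) % n] = '>'
--             cnt += 1
--     return cnt
-- ===== Notes on version B (the rewrite author's own statement) =====
-- stated objective: simpler
-- what changed: Replaces A's single in-place walk with the j+=1 skip trick and first_elem snapshot by a per-row identify-then-apply decomposition: collect all movable indices from the unmodified row (neighbour via (j+1)%n), then apply the moves and count them.
import Mathlib
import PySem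

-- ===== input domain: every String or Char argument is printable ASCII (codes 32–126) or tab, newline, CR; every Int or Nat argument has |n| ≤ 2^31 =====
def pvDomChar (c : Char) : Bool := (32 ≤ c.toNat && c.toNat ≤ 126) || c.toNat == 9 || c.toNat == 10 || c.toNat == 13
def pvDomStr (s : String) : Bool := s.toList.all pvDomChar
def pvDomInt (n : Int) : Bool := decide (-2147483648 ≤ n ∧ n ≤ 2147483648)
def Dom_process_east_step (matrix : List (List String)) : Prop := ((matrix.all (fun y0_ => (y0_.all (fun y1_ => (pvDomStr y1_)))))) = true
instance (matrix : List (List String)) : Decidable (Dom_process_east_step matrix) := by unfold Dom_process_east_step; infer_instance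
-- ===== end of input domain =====

-- B is the same task by a two-pass identify-then-apply decomposition; both A and B
-- mutate the rows in place identically, and the theorems are about the return value.

-- ===== PORT A =====
-- A's while loop over one row: state (row, j, cnt), with the j += 1 skip after a move.
-- row[j] reads are in range whenever j < n = row.length, so getD is exact there.
def rowA (orig_first : String) (n : Nat) (row : List String) (j : Nat) (cnt : Int) :
    List String × Int :=
  if j < n then
    if row.getD j "" = ">" then
      if j = n - 1 then
        if orig_first = "." then
          rowA orig_first n ((row.set j ".").set 0 ">") (j + 1) (cnt + 1)
        else rowA orig_first n row (j + 1) cnt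
      else if row.getD (j + 1) "" = "." then
        rowA orig_first n ((row.set j ".").set (j + 1) ">") (j + 2) (cnt + 1)
      else rowA orig_first n row (j + 1) cnt
    else rowA orig_first n row (j + 1) cnt
  else (row, cnt)
termination_by n - j

def process_east_step (matrix : List (List String)) : Int :=
  matrix.foldl (fun cnt row => (rowA (row.getD 0 "") row.length row 0 cnt).2) 0

-- ===== PORT B =====
-- is j a movable east-facing cucumber in the original row?
def movesPred (row : List String) (n : Nat) (j : Nat) : Bool :=
  (row.getD j "" == ">") && (row.getD ((j + 1) % n) "" == ".")

-- second pass of B: apply each collected move, incrementing the counter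
def applyMoves (n : Nat) (moves : List Nat) (st : List String × Int) : List String × Int :=
  moves.foldl (fun st j => ((st.1.set j ".").set ((j + 1) % n) ">", st.2 + 1)) st

def process_east_step_alt (matrix : List (List String)) : Int :=
  matrix.foldl (fun cnt row =>
    let n := row.length
    let moves := (List.range n).filter (movesPred row n)
    (applyMoves n moves (row, cnt)).2) 0

-- ===== PRECONDITION & SPEC =====
-- Pre_ excludes matrices containing an empty row: there the Python A raises IndexError at row[0].
def Pre_process_east_step (matrix : List (List String)) : Prop :=
  ∀ row ∈ matrix, row ≠ []
instance (matrix : List (List String)) : Decidable (Pre_process_east_step matrix) := by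
  unfold Pre_process_east_step; infer_instance
def pvWitness_process_east_step : List (List String) := [[">", ".", ">", ">"], ["."]]

def Spec_process_east_step (matrix : List (List String)) (out : Int) : Prop :=
  out = process_east_step_alt matrix
instance (matrix : List (List String)) (out : Int) : Decidable (Spec_process_east_step matrix out) := by
  unfold Spec_process_east_step; infer_instance

-- ===== CLAIM (what is proved, stated in full; the proofs are below) =====
def Claim_equal_process_east_step : Prop := ∀ (matrix : List (List String)), Dom_process_east_step matrix → Pre_process_east_step matrix → Spec_process_east_step matrix (process_east_step matrix)

-- ===== LEMMAS AND PROOFS =====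

-- count of still-pending moves of the original row, from index j on
def specCount (orig : List String) (n j : Nat) : Nat :=
  ((List.range' j (n - j)).filter (movesPred orig n)).length

lemma applyMoves_snd (n : Nat) (moves : List Nat) :
    ∀ st : List String × Int, (applyMoves n moves st).2 = st.2 + moves.length := by
  induction moves with
  | nil => intro st; simp [applyMoves]
  | cons m ms ih =>
      intro st
      simp only [applyMoves, List.foldl_cons] at *
      rw [ih]
      push_cast [List.length_cons]
      ring

lemma specCount_step (orig : List String) (n j : Nat) (h : j < n) :
    specCount orig n j = (if movesPred orig n j then 1 else 0) + specCount orig n (j + 1) := by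
  have hd : n - j = (n - (j + 1)) + 1 := by omega
  unfold specCount
  rw [hd, List.range'_succ, List.filter_cons]
  split
  · simp; omega
  · simp

lemma specCount_last (orig : List String) (n : Nat) : specCount orig n n = 0 := by
  simp [specCount]

lemma getD_set_ne (l : List String) (i k : Nat) (a : String) (h : i ≠ k) :
    (l.set i a).getD k "" = l.getD k "" := by
  simp [List.getD, List.getElem?_set_ne h]

lemma rowA_count (orig : List String) (n j : Nat) (cnt : Int) (row : List String)
    (hinv : ∀ k, j ≤ k → k < n → row.getD k "" = orig.getD k "") :
    (rowA (orig.getD 0 "") n row j cnt).2 = cnt + (specCount orig n j : Int) := by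
  unfold rowA
  by_cases hj : j < n
  · simp only [if_pos hj]
    have hrj : row.getD j "" = orig.getD j "" := hinv j le_rfl hj
    by_cases hgt : row.getD j "" = ">"
    · simp only [if_pos hgt]
      by_cases hend : j = n - 1
      · simp only [if_pos hend]
        have hjn : j + 1 = n := by omega
        have hmod : (j + 1) % n = 0 := by rw [hjn]; exact Nat.mod_self n
        by_cases hfst : orig.getD 0 "" = "."
        · simp only [if_pos hfst]
          have hpred : movesPred orig n j = true := by
            unfold movesPred; rw [hmod]
            simp only [Bool.and_eq_true, beq_iff_eq]
            exact ⟨hrj.symm.trans hgt, hfst⟩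
          rw [rowA_count orig n (j + 1) (cnt + 1) ((row.set j ".").set 0 ">")
              (fun k hk1 hk2 => absurd hk2 (by omega))]
          rw [specCount_step orig n j hj, hpred, hjn, specCount_last]
          simp only [if_true]
          push_cast; ring
        · simp only [if_neg hfst]
          have hpred : movesPred orig n j = false := by
            unfold movesPred; rw [hmod]
            simp only [Bool.and_eq_false_iff, beq_eq_false_iff_ne, ne_eq]
            right; exact hfst
          rw [rowA_count orig n (j + 1) cnt row (fun k hk1 hk2 => hinv k (by omega) hk2)]
          rw [specCount_step orig n j hj, hpred]
          push_cast; ring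
      · simp only [if_neg hend]
        have hj1 : j + 1 < n := by omega
        have hrj1 : row.getD (j + 1) "" = orig.getD (j + 1) "" :=
          hinv (j + 1) (by omega) hj1
        have hmod : (j + 1) % n = j + 1 := Nat.mod_eq_of_lt hj1
        by_cases hdot : row.getD (j + 1) "" = "."
        · simp only [if_pos hdot]
          have hpred : movesPred orig n j = true := by
            unfold movesPred; rw [hmod]
            simp only [Bool.and_eq_true, beq_iff_eq]
            exact ⟨hrj.symm.trans hgt, hrj1.symm.trans hdot⟩
          have hpred1 : movesPred orig n (j + 1) = false := by
            unfold movesPred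
            simp only [Bool.and_eq_false_iff, beq_eq_false_iff_ne, ne_eq]
            left
            exact fun h => absurd ((hrj1.symm.trans hdot).symm.trans h) (by decide)
          rw [rowA_count orig n (j + 2) (cnt + 1) ((row.set j ".").set (j + 1) ">")
              (fun k hk1 hk2 => by
                rw [getD_set_ne _ _ _ _ (by omega), getD_set_ne _ _ _ _ (by omega)]
                exact hinv k (by omega) hk2)]
          rw [specCount_step orig n j hj, hpred,
              specCount_step orig n (j + 1) hj1, hpred1]
          simp only [if_true]
          push_cast; ring
        · simp only [if_neg hdot]
          have hpred : movesPred orig n j = false := by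
            unfold movesPred; rw [hmod]
            simp only [Bool.and_eq_false_iff, beq_eq_false_iff_ne, ne_eq]
            right; exact fun h => hdot (hrj1.trans h)
          rw [rowA_count orig n (j + 1) cnt row (fun k hk1 hk2 => hinv k (by omega) hk2)]
          rw [specCount_step orig n j hj, hpred]
          push_cast; ring
    · simp only [if_neg hgt]
      have hpred : movesPred orig n j = false := by
        unfold movesPred
        simp only [Bool.and_eq_false_iff, beq_eq_false_iff_ne, ne_eq]
        left; exact fun h => hgt (hrj.trans h)
      rw [rowA_count orig n (j + 1) cnt row (fun k hk1 hk2 => hinv k (by omega) hk2)]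
      rw [specCount_step orig n j hj, hpred]
      push_cast; ring
  · simp only [if_neg hj]
    have hz : specCount orig n j = 0 := by
      unfold specCount
      have : n - j = 0 := by omega
      simp [this]
    rw [hz]
    simp
termination_by n - j

lemma row_eq (row : List String) (cnt : Int) :
    (rowA (row.getD 0 "") row.length row 0 cnt).2 =
      (applyMoves row.length ((List.range row.length).filter (movesPred row row.length))
        (row, cnt)).2 := by
  rw [applyMoves_snd, rowA_count row row.length 0 cnt row (fun _ _ _ => rfl)]
  congr 1
  rw [List.range_eq_range']
  simp [specCount]

lemma fold_eq (matrix : List (List String)) :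
    ∀ cnt : Int,
      matrix.foldl (fun cnt row => (rowA (row.getD 0 "") row.length row 0 cnt).2) cnt =
      matrix.foldl (fun cnt row =>
        (applyMoves row.length ((List.range row.length).filter (movesPred row row.length))
          (row, cnt)).2) cnt := by
  induction matrix with
  | nil => intro cnt; rfl
  | cons r rs ih =>
      intro cnt
      simp only [List.foldl_cons]
      rw [row_eq, ih]

-- ===== VERDICT (by name: the statement is the Claim_ definition above) =====
theorem process_east_step_spec : Claim_equal_process_east_step := by
  intro matrix _ _
  unfold Spec_process_east_step process_east_step process_east_step_alt
  exact fold_eq matrix 0
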